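-- pv_equiv track=rewrite | github.com/p141592/avito_python_api | scripts/parse_inventory.py | read_table
-- ===== SOURCE A (Python) =====
-- def read_table(
--     lines: list[str], marker: str | None = None, heading: str | None = None
-- ) -> list[str]:
--     start = None
--     if marker is not None:
--         for index, line in enumerate(lines):
--             if marker in line:
--                 start = index + 1
--                 break
--     elif heading is not None:
--         for index, line in enumerate(lines):
--             if line.strip() == heading:
--                 start = index + 1
--                 break
--     if start is None:
--         return []
--
--     table: list[str] = []
--     for line in lines[start:]:
--         if line.startswith("|"):
--             table.append(line)
--             continue
--         if table:
--             break
--     return table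
-- ===== SOURCE B (Python) =====
-- def read_table(lines, marker=None, heading=None):
--     # Single fused pass: a finite-state machine over the lines.
--     # state 0 = searching for the marker/heading line,
--     # state 1 = inside the region after it (skipping until / collecting '|' lines),
--     # state 2 = done (contiguous '|' run ended).
--     if marker is not None:
--         hit = lambda l: marker in l
--     elif heading is not None:
--         hit = lambda l: l.strip() == heading
--     else:
--         return []
--     state, table = 0, []
--     for line in lines:
--         if state == 0:
--             if hit(line):
--                 state = 1
--         elif state == 1:
--             if line.startswith("|"):
--                 table.append(line)
--             elif table:
--                 state = 2
--     return table
-- ===== Notes on version B (the rewrite author's own statement) =====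
-- stated objective: alternative
-- what changed: A's staged find-start / slice / harvest-with-break loops are fused into one single pass over all lines driven by an explicit 3-state machine (seek / collect / done) that never slices or breaks; same O(n) cost.
import Mathlib
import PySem

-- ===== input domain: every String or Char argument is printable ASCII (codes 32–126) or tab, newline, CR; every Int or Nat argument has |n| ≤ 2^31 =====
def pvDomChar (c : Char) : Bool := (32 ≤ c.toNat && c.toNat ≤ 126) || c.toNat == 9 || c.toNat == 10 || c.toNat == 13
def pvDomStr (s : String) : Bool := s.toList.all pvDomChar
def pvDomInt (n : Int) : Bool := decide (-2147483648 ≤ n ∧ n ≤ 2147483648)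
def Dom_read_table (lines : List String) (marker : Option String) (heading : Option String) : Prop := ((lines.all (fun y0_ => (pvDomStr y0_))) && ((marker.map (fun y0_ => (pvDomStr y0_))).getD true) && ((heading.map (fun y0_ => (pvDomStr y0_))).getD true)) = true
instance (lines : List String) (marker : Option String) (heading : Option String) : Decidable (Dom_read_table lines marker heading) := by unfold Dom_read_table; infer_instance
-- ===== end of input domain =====

-- B fuses A's staged find-start / slice / harvest loops into one single pass
-- over all lines driven by an explicit 3-state machine (alternative, same cost).

-- ===== PORT A =====
-- A's two start-search loops: 'for index, line in enumerate(lines): if p(line): start = index+1; break'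
def pvFindLoop (p : String → Bool) : List String → Nat → Option Nat
  | [], _ => none
  | l :: ls, i => if p l then some (i + 1) else pvFindLoop p ls (i + 1)

-- A's harvest loop over lines[start:] with accumulator 'table'
def pvHarvest : List String → List String → List String
  | [], table => table
  | l :: ls, table =>
    if PySem.Str.startswith l "|" then pvHarvest ls (table ++ [l])
    else if table ≠ [] then table
    else pvHarvest ls table

def read_table (lines : List String) (marker : Option String) (heading : Option String) : List String :=
  let start? : Option Nat :=
    match marker with
    | some m => pvFindLoop (fun l => PySem.Str.isIn m l) lines 0
    | none =>
      match heading with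
      | some h => pvFindLoop (fun l => PySem.Str.strip l == h) lines 0
      | none => none
  match start? with
  | none => []
  | some start => pvHarvest (PySem.List.slice lines (some (start : Int)) none) []

-- ===== PORT B =====
-- Source B's loop body: one transition of the state machine (state 0 seek, 1 collect, 2 done)
def pvStep (hit : String → Bool) : (Nat × List String) → String → (Nat × List String)
  | (0, t), l => if hit l then (1, t) else (0, t)
  | (1, t), l =>
    if PySem.Str.startswith l "|" then (1, t ++ [l])
    else if t ≠ [] then (2, t) else (1, t)
  | (st, t), _ => (st, t)

def read_table_alt (lines : List String) (marker : Option String) (heading : Option String) : List String :=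
  let hit? : Option (String → Bool) :=
    match marker with
    | some m => some (fun l => PySem.Str.isIn m l)
    | none =>
      match heading with
      | some h => some (fun l => PySem.Str.strip l == h)
      | none => none
  match hit? with
  | none => []
  | some hit => (lines.foldl (pvStep hit) (0, [])).2

-- ===== PRECONDITION & SPEC =====
def Spec_read_table (lines : List String) (marker : Option String) (heading : Option String) (out : List String) : Prop := out = read_table_alt lines marker heading
instance (lines : List String) (marker : Option String) (heading : Option String) (out : List String) : Decidable (Spec_read_table lines marker heading out) := by unfold Spec_read_table; infer_instance

-- ===== CLAIM =====
def Claim_equal_read_table : Prop := ∀ (lines : List String) (marker : Option String) (heading : Option String), Dom_read_table lines marker heading → Spec_read_table lines marker heading (read_table lines marker heading)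

-- ===== LEMMAS AND PROOFS =====

theorem pvFindLoop_eq (p : String → Bool) (ls : List String) :
    ∀ i : Nat, pvFindLoop p ls i = (ls.findIdx? p).map (fun k => i + k + 1) := by
  induction ls with
  | nil => intro i; simp [pvFindLoop]
  | cons l ls ih =>
    intro i
    simp only [pvFindLoop, List.findIdx?_cons]
    by_cases h : p l
    · simp [h]
    · simp only [h, ih (i + 1)]
      cases ls.findIdx? p
      · simp
      · simp; omega

theorem foldl_step_two (hit : String → Bool) (ls : List String) (t : List String) :
    ls.foldl (pvStep hit) (2, t) = (2, t) := by
  induction ls with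
  | nil => rfl
  | cons l ls ih => simpa [pvStep] using ih

theorem foldl_step_one (hit : String → Bool) (ls : List String) :
    ∀ t : List String, (ls.foldl (pvStep hit) (1, t)).2 = pvHarvest ls t := by
  induction ls with
  | nil => intro t; simp [pvHarvest]
  | cons l ls ih =>
    intro t
    simp only [List.foldl_cons, pvHarvest, pvStep]
    by_cases h : PySem.Str.startswith l "|"
    · rw [if_pos h, if_pos h, ih]
    · rw [if_neg h, if_neg h]
      by_cases ht : t = []
      · rw [if_neg (by simp [ht]), if_neg (by simp [ht]), ih]
      · rw [if_pos ht, if_pos ht, foldl_step_two]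

theorem foldl_step_zero (hit : String → Bool) (ls : List String) :
    (ls.foldl (pvStep hit) (0, [])).2 =
      match ls.findIdx? hit with
      | none => []
      | some k => pvHarvest (ls.drop (k + 1)) [] := by
  induction ls with
  | nil => rfl
  | cons l ls ih =>
    simp only [List.foldl_cons, pvStep, List.findIdx?_cons]
    by_cases h : hit l
    · rw [if_pos h]
      simp only [h, if_true, List.drop_succ_cons, List.drop_zero]
      exact foldl_step_one hit ls []
    · rw [if_neg h]
      simp only [h, ih]
      cases ls.findIdx? hit with
      | none => rfl
      | some k => simp

theorem pvA_eq_fold (hit : String → Bool) (lines : List String) :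
    (match pvFindLoop hit lines 0 with
      | none => ([] : List String)
      | some start => pvHarvest (PySem.List.slice lines (some (start : Int)) none) []) =
    (lines.foldl (pvStep hit) (0, [])).2 := by
  rw [foldl_step_zero, pvFindLoop_eq]
  cases hf : lines.findIdx? hit with
  | none => rfl
  | some k =>
    simp only [Option.map_some, Nat.zero_add]
    rw [PySem.List.slice_from_natCast]

theorem read_table_eq_alt (lines : List String) (marker : Option String) (heading : Option String) :
    read_table lines marker heading = read_table_alt lines marker heading := by
  unfold read_table read_table_alt
  cases marker with
  | some m => exact pvA_eq_fold _ lines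
  | none =>
    cases heading with
    | none => rfl
    | some h => exact pvA_eq_fold _ lines

-- ===== VERDICT =====
theorem read_table_spec : Claim_equal_read_table := by
  intro lines marker heading _
  unfold Spec_read_table
  exact read_table_eq_alt lines marker heading
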